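-- pv_equiv track=rewrite | github.com/github-suraj/coding-challenges | lists/list_functions.py | arrange_numbers
-- ===== SOURCE A (Python) =====
-- def arrange_numbers(list1):
--     '''
--         Funcation to arrange list of numbers as;
--         - All negative number should be in left
--         - All positive number should be in right
--     '''
--     list2 = []
--     negative_idx = 0
--     for num in list1:
--         if num < 0:
--             list2.insert(negative_idx, num)
--             negative_idx += 1
--         else:
--             list2.append(num)
--     return list2
-- ===== SOURCE B (Python) =====
-- def arrange_numbers(list1):
--     return sorted(list1, key=lambda x: 0 if x < 0 else 1)
-- ===== Notes on version B (the rewrite author's own statement) =====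
-- stated objective: idiomatic
-- what changed: Replaced the explicit loop with list.insert at a maintained negative-index counter by a single key-based stable sort (sorted with key 0 for negatives, 1 otherwise), whose stability preserves each group's relative order.
import Mathlib
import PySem

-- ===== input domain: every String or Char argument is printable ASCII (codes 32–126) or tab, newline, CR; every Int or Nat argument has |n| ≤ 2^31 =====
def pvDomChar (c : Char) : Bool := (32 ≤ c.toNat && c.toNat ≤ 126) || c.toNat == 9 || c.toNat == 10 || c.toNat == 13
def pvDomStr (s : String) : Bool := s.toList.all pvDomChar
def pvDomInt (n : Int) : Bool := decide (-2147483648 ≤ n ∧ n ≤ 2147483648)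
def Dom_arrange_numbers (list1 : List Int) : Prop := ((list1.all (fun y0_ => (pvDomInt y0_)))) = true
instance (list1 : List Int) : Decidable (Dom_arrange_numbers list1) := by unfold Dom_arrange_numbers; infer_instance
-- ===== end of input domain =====

-- B replaces A's explicit partition loop (insert at a maintained negative-index counter)
-- by one key-based stable sort; same return value, no mutation in either version.

-- ===== PORT A =====
-- loop state: (list2, negative_idx); negatives are inserted at negative_idx, others appended
def arrange_numbers (list1 : List Int) : List Int :=
  (list1.foldl
    (fun (st : List Int × Int) num =>
      if num < 0 then (PySem.List.insert st.1 st.2 num, st.2 + 1)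
      else (st.1 ++ [num], st.2))
    ([], 0)).1

-- ===== PORT B =====
-- sorted(list1, key=lambda x: 0 if x < 0 else 1)
def arrange_numbers_alt (list1 : List Int) : List Int :=
  PySem.List.sorted list1 (fun x => if x < 0 then (0 : Int) else 1)

-- ===== PRECONDITION & SPEC =====
def Spec_arrange_numbers (list1 : List Int) (out : List Int) : Prop := out = arrange_numbers_alt list1
instance (list1 : List Int) (out : List Int) : Decidable (Spec_arrange_numbers list1 out) := by unfold Spec_arrange_numbers; infer_instance

-- ===== CLAIM (what is proved, stated in full; the proofs are below) =====
def Claim_equal_arrange_numbers : Prop := ∀ (list1 : List Int), Dom_arrange_numbers list1 → Spec_arrange_numbers list1 (arrange_numbers list1)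

-- ===== LEMMAS AND PROOFS =====

-- A's loop keeps negatives-so-far in front of the others; generalized invariant.
theorem arrange_loop (xs : List Int) : ∀ (negs nonnegs : List Int),
    (List.foldl
      (fun (st : List Int × Int) num =>
        if num < 0 then (PySem.List.insert st.1 st.2 num, st.2 + 1)
        else (st.1 ++ [num], st.2))
      (negs ++ nonnegs, (negs.length : Int)) xs).1
    = (negs ++ xs.filter (fun x => decide (x < 0))) ++ (nonnegs ++ xs.filter (fun x => !decide (x < 0))) := by
  induction xs with
  | nil => intro negs nonnegs; simp
  | cons x xs ih =>
    intro negs nonnegs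
    by_cases hx : x < 0
    · have hins : PySem.List.insert (negs ++ nonnegs) (negs.length : Int) x
          = (negs ++ [x]) ++ nonnegs := by
        rw [PySem.List.insert_natCast _ _ _ (by simp)]
        simp
      have hlen : ((negs.length : Int) + 1) = (((negs ++ [x]).length : Nat) : Int) := by
        simp
      simp only [List.foldl_cons, if_pos hx, hins, hlen]
      rw [ih (negs ++ [x]) nonnegs]
      simp [hx]
    · have : negs ++ nonnegs ++ [x] = negs ++ (nonnegs ++ [x]) := by simp
      simp only [List.foldl_cons, if_neg hx, this]
      rw [ih negs (nonnegs ++ [x])]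
      simp [hx]

theorem insertBy_append_left {α : Type} (before : α → α → Bool) (x : α) (l t : List α)
    (h : ∀ y ∈ l, before x y = false) :
    PySem.List.insertBy before x (l ++ t) = l ++ PySem.List.insertBy before x t := by
  induction l with
  | nil => simp
  | cons a l ih =>
    have ha : before x a = false := h a (by simp)
    simp only [List.cons_append, PySem.List.insertBy, ha]
    simp [ih (fun y hy => h y (by simp [hy]))]

-- B's stable insertion-sort loop keeps the same shape: negatives block then others block.
theorem sorted_loop (xs : List Int) : ∀ (negs nonnegs : List Int),
    (∀ y ∈ negs, y < 0) → (∀ y ∈ nonnegs, ¬ y < 0) →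
    List.foldl
      (fun acc x => PySem.List.insertBy
        (fun a b => decide ((if a < 0 then (0 : Int) else 1) < (if b < 0 then (0 : Int) else 1))) x acc)
      (negs ++ nonnegs) xs
    = (negs ++ xs.filter (fun x => decide (x < 0))) ++ (nonnegs ++ xs.filter (fun x => !decide (x < 0))) := by
  induction xs with
  | nil => intro negs nonnegs _ _; simp
  | cons x xs ih =>
    intro negs nonnegs hn hp
    set before : Int → Int → Bool :=
      fun a b => decide ((if a < 0 then (0 : Int) else 1) < (if b < 0 then (0 : Int) else 1)) with hb
    by_cases hx : x < 0
    · have hstep : PySem.List.insertBy before x (negs ++ nonnegs) = (negs ++ [x]) ++ nonnegs := by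
        rw [insertBy_append_left before x negs nonnegs
          (fun y hy => by simp [hb, if_pos hx, if_pos (hn y hy)])]
        cases nonnegs with
        | nil => simp [PySem.List.insertBy]
        | cons a t =>
          have ha : ¬ a < 0 := hp a (by simp)
          simp [PySem.List.insertBy, hb, if_pos hx, if_neg ha]
      simp only [List.foldl_cons, hstep]
      rw [ih (negs ++ [x]) nonnegs
        (by intro y hy; rcases List.mem_append.mp hy with h | h; exact hn y h; exact (List.mem_singleton.mp h) ▸ hx) hp]
      simp [hx]
    · have hstep : PySem.List.insertBy before x (negs ++ nonnegs) = negs ++ (nonnegs ++ [x]) := by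
        rw [PySem.List.insertBy_of_forall_not_before before x (negs ++ nonnegs)
          (by intro y _; by_cases hy : y < 0 <;> simp [hb, if_neg hx, hy])]
        simp
      simp only [List.foldl_cons, hstep]
      rw [ih negs (nonnegs ++ [x])
        hn (by intro y hy; rcases List.mem_append.mp hy with h | h; exact hp y h; exact (List.mem_singleton.mp h) ▸ hx)]
      simp [hx]

-- ===== VERDICT (by name: the statement is the Claim_ definition above) =====
theorem arrange_numbers_spec : Claim_equal_arrange_numbers := by
  intro list1 _
  unfold Spec_arrange_numbers arrange_numbers arrange_numbers_alt
  rw [PySem.List.sorted_eq_foldl_insertBy]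
  have hA := arrange_loop list1 [] []
  have hB := sorted_loop list1 [] [] (by simp) (by simp)
  simp only [List.nil_append, List.append_nil, List.length_nil, Nat.cast_zero] at hA hB
  rw [hA, hB]
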